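-- pv_equiv track=rewrite | github.com/NicoBusuioc/Vanar_django_Course | 1_Lesson/3_exercise.py | _create_str_for_schema
-- ===== SOURCE A (Python) =====
-- def _create_str_for_schema(shelf):
--     if not shelf:
--         return ("#                            #")
--     new_shelf = list(shelf)
--     if len(new_shelf) < 28:
--         while True:
--             if len(new_shelf) == 27:
--                 new_shelf.insert(0, " ")
--                 new_shelf.insert(0, "#")
--                 new_shelf.append("#")
--                 break
--             elif len(new_shelf) == 28:
--                 new_shelf.insert(0, "#")
--                 new_shelf.append("#")
--                 break
--             else:
--                 new_shelf.insert(0, " ")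
--                 new_shelf.append(" ")
--
--         return ''.join(new_shelf)
--     else:
--         return shelf
-- ===== SOURCE B (Python) =====
-- def _create_str_for_schema(shelf):
--     if not shelf:
--         return "#                            #"
--     if len(shelf) >= 28:
--         return shelf
--     marg = 28 - len(shelf)
--     right = marg // 2
--     left = marg - right
--     return "#" + " " * left + "".join(shelf) + " " * right + "#"
-- ===== Notes on version B (the rewrite author's own statement) =====
-- stated objective: simpler
-- what changed: Replaces the incremental two-sided insert/append while-loop with a direct closed-form computation of the left/right padding widths (extra space on the left) and a single string concatenation.
import Mathlib
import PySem

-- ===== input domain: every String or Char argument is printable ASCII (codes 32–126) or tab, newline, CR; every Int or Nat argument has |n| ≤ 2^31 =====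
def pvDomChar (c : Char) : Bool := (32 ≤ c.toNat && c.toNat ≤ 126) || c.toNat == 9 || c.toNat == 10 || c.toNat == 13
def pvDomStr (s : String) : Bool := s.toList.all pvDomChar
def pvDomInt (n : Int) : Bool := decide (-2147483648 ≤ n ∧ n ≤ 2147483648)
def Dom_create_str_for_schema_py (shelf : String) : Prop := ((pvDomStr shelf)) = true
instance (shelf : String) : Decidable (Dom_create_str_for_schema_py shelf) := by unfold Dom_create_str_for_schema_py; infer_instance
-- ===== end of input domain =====

-- B replaces A's incremental insert/append padding loop by a closed-form padding computation; simpler, same return value.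

-- ===== PORT A =====
-- A's `while True` padding loop; the final `else` branch is a totality guard only
-- (Python's loop diverges there; A only ever calls the loop with length < 28).
def pyPadLoop (l : List Char) : List Char :=
  if l.length = 27 then '#' :: ' ' :: (l ++ ['#'])
  else if l.length = 28 then '#' :: (l ++ ['#'])
  else if l.length < 28 then pyPadLoop (' ' :: (l ++ [' ']))
  else l
termination_by 28 - l.length
decreasing_by simp; omega

def create_str_for_schema_py (shelf : String) : String :=
  if shelf.length = 0 then "#                            #"
  else
    let new_shelf := shelf.toList
    if new_shelf.length < 28 then String.mk (pyPadLoop new_shelf)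
    else shelf

-- ===== PORT B =====
def create_str_for_schema_py_alt (shelf : String) : String :=
  if shelf.length = 0 then "#                            #"
  else if 28 ≤ shelf.length then shelf
  else
    let marg := 28 - shelf.length
    let right := marg / 2
    let left := marg - right
    -- '#' + ' '*left + ''.join(items) + ' '*right + '#' (string concatenation as char lists)
    String.mk ('#' :: (List.replicate left ' ' ++ shelf.toList ++ List.replicate right ' ' ++ ['#']))

-- ===== PRECONDITION & SPEC =====
def Spec_create_str_for_schema_py (shelf : String) (out : String) : Prop := out = create_str_for_schema_py_alt shelf
instance (shelf : String) (out : String) : Decidable (Spec_create_str_for_schema_py shelf out) := by unfold Spec_create_str_for_schema_py; infer_instance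

-- ===== CLAIM (what is proved, stated in full; the proofs are below) =====
def Claim_equal_create_str_for_schema_py : Prop := ∀ (shelf : String), Dom_create_str_for_schema_py shelf → Spec_create_str_for_schema_py shelf (create_str_for_schema_py shelf)

-- ===== LEMMAS AND PROOFS =====

theorem pyPadLoop_closed (m : ℕ) : ∀ (l : List Char), l.length ≤ 28 → 28 - l.length = m →
    pyPadLoop l =
      '#' :: (List.replicate (28 - l.length - (28 - l.length) / 2) ' ' ++ l
        ++ List.replicate ((28 - l.length) / 2) ' ' ++ ['#']) := by
  induction m using Nat.strong_induction_on with
  | _ m ih =>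
    intro l h hm
    rw [pyPadLoop]
    by_cases h27 : l.length = 27
    · simp [h27]
    · by_cases h28 : l.length = 28
      · simp [h28]
      · have hlen : l.length ≤ 26 := by omega
        simp only [if_neg h27, if_neg h28, if_pos (by omega : l.length < 28)]
        have hrec := ih (28 - (l.length + 2)) (by omega) (' ' :: (l ++ [' ']))
          (by simp; omega) (by simp)
        rw [hrec]
        have hL : (' ' :: (l ++ [' '])).length = l.length + 2 := by simp
        rw [hL]
        have e1 : (28 - (l.length + 2)) / 2 + 1 = (28 - l.length) / 2 := by omega
        rw [← e1]
        have e3 : 28 - l.length - ((28 - (l.length + 2)) / 2 + 1)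
            = 28 - (l.length + 2) - (28 - (l.length + 2)) / 2 + 1 := by omega
        rw [e3]
        rw [List.replicate_succ' (n := 28 - (l.length + 2) - (28 - (l.length + 2)) / 2)]
        rw [List.replicate_succ (n := (28 - (l.length + 2)) / 2)]
        simp [List.append_assoc]

-- ===== VERDICT (by name: the statement is the Claim_ definition above) =====
theorem create_str_for_schema_py_spec : Claim_equal_create_str_for_schema_py := by
  intro shelf _
  unfold Spec_create_str_for_schema_py create_str_for_schema_py create_str_for_schema_py_alt
  by_cases h0 : shelf.length = 0
  · simp [h0]
  · simp only [if_neg h0]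
    have hlen : shelf.toList.length = shelf.length := by simp
    by_cases h28 : 28 ≤ shelf.length
    · simp [hlen, h28, Nat.not_lt.mpr h28]
    · have hlt : shelf.toList.length < 28 := by omega
      simp only [hlen, if_neg h28]
      rw [pyPadLoop_closed (28 - shelf.toList.length) shelf.toList (by omega) rfl]
      simp [hlen, h28, List.append_assoc]
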